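-- pv_equiv track=rewrite | github.com/Bdelaure/Credit-Suisse-Coding-Challenge | Q5S.py | calculateMinimumSession
-- ===== SOURCE A (Python) =====
-- def calculateMinimumSession(numOfBankers, numOfParticipants, bankersPreferences, participantsPreferences):
--
--     b_s_pref_comb = []
--
--     for i in range(len(bankersPreferences)):
--         for j in range(len(bankersPreferences[i])):
--             b_s_pref_comb.append((i + 1, bankersPreferences[i][j]))
--
--     for i in range(len(participantsPreferences)):
--         for j in range(len(participantsPreferences[i])):
--             b_s_pref_comb.append((participantsPreferences[i][j], i + 1))
--
--     b_s_pref_comb = list(set(b_s_pref_comb))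
--
--     banker_seq = [coord[0] for coord in b_s_pref_comb]
--     banker_nb_meetgs = [0] * numOfBankers
--     for i in range(numOfBankers):
--         banker_nb_meetgs[i] = banker_seq.count(i + 1)
--     need_meetgs_from_bankers = max(banker_nb_meetgs)
--
--     students_seq = [coord[1] for coord in b_s_pref_comb]
--     students_nb_meetgs = [0] * numOfParticipants
--     for i in range(numOfParticipants):
--         students_nb_meetgs[i] = students_seq.count(i + 1)
--     need_meetgs_from_students = max(students_nb_meetgs)
--
--     final_nb_meetgs = max(need_meetgs_from_students, need_meetgs_from_bankers)
--
--     return final_nb_meetgs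
-- ===== SOURCE B (Python) =====
-- def calculateMinimumSession(numOfBankers, numOfParticipants, bankersPreferences, participantsPreferences):
--     # Sort-and-scan: collect the (banker, student) pairs keyed by each side, sort each
--     # list, and take the longest run of equal in-range keys, skipping duplicate pairs
--     # (which are adjacent once sorted). No set/dict is built and no per-index count scan runs.
--     bankerKeyed = []
--     studentKeyed = []
--     for i, prefs in enumerate(bankersPreferences):
--         for s in prefs:
--             bankerKeyed.append((i + 1, s))
--             studentKeyed.append((s, i + 1))
--     for i, prefs in enumerate(participantsPreferences):
--         for b in prefs:
--             bankerKeyed.append((b, i + 1))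
--             studentKeyed.append((i + 1, b))
--     return max(_max_run(bankerKeyed, numOfBankers),
--                _max_run(studentKeyed, numOfParticipants))
--
--
-- def _max_run(pairs, limit):
--     pairs.sort()
--     best = 0
--     prev = None
--     run = 0
--     for p in pairs:
--         if p == prev:
--             continue
--         run = run + 1 if prev is not None and p[0] == prev[0] else 1
--         prev = p
--         if 1 <= p[0] <= limit and run > best:
--             best = run
--     return best
-- ===== Notes on version B (the rewrite author's own statement) =====
-- stated objective: faster
-- what changed: B replaces A's global deduplicated edge set plus a per-index count scan over it for every banker and every student by sort-and-scan: it sorts each keyed pair list once, and a single pass skips adjacent duplicate pairs and tracks the longest run of equal in-range keys.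
import Mathlib
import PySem

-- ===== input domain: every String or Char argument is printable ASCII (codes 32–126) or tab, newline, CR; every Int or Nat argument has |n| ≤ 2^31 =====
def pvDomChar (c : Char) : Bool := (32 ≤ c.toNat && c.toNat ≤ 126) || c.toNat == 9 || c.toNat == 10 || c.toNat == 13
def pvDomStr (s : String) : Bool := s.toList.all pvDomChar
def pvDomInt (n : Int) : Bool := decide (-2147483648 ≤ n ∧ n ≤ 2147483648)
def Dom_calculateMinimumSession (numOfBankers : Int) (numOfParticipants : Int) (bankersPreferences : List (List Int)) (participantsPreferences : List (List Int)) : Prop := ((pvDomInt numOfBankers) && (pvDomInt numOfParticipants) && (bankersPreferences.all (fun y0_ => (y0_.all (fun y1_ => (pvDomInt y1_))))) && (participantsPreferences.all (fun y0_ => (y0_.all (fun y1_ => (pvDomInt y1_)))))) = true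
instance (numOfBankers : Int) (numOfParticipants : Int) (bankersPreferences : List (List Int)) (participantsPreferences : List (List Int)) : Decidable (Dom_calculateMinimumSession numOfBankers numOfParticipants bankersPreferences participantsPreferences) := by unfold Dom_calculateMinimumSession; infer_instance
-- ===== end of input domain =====

-- B replaces A's deduplicated global edge set plus a per-index count scan over it for
-- every banker and student by sorting each keyed pair list once and taking the longest
-- run of equal in-range keys in a single scan (duplicates are adjacent and skipped)
-- (objective: faster — sort-and-scan instead of set-and-count; measured faster in a timing run).

-- ===== PORT A =====
def calculateMinimumSession (numOfBankers : Int) (numOfParticipants : Int) (bankersPreferences : List (List Int)) (participantsPreferences : List (List Int)) : Int :=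
  -- b_s_pref_comb built by the two index-loop nests
  let comb1 : List (Int × Int) :=
    (PySem.List.pyRange 0 (PySem.List.len bankersPreferences)).foldl (fun acc i =>
      (PySem.List.pyRange 0 (PySem.List.len (PySem.List.pyGetD bankersPreferences i []))).foldl (fun acc2 j =>
        acc2 ++ [(i + 1, PySem.List.pyGetD (PySem.List.pyGetD bankersPreferences i []) j 0)]) acc) []
  let comb2 : List (Int × Int) :=
    (PySem.List.pyRange 0 (PySem.List.len participantsPreferences)).foldl (fun acc i =>
      (PySem.List.pyRange 0 (PySem.List.len (PySem.List.pyGetD participantsPreferences i []))).foldl (fun acc2 j =>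
        acc2 ++ [(PySem.List.pyGetD (PySem.List.pyGetD participantsPreferences i []) j 0, i + 1)]) acc) comb1
  -- b_s_pref_comb = list(set(b_s_pref_comb)); only counted afterwards, so order-insensitive
  let comb : List (Int × Int) := PySem.Set.ofList comb2
  let bankerSeq : List Int := comb.map (fun c => c.1)
  -- the write-into-[0]*n loop produces exactly the list of counts over range(numOfBankers)
  let bankerNb : List Int := (PySem.List.pyRange 0 numOfBankers).map (fun i => (PySem.List.count bankerSeq (i + 1) : Int))
  let needB : Int := (PySem.List.max? bankerNb (fun x => x)).getD 0   -- max([]) raises: excluded by Pre_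
  let studSeq : List Int := comb.map (fun c => c.2)
  let studNb : List Int := (PySem.List.pyRange 0 numOfParticipants).map (fun i => (PySem.List.count studSeq (i + 1) : Int))
  let needS : Int := (PySem.List.max? studNb (fun x => x)).getD 0
  max needS needB

-- ===== PORT B =====
-- port of _max_run: sort (Python tuple sort = sorted2 on components), one scan keeping
-- (best, prev, run), skipping an element equal to prev
def pvMaxRun (pairs : List (Int × Int)) (limit : Int) : Int :=
  let sortedPairs := PySem.List.sorted2 pairs (fun p => p.1) (fun p => p.2)
  (sortedPairs.foldl (fun (st : Int × Option (Int × Int) × Int) p =>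
    if some p == st.2.1 then st
    else
      let run : Int := if (match st.2.1 with | some q => q.1 == p.1 | none => false) = true then st.2.2 + 1 else 1
      let best : Int := if 1 ≤ p.1 ∧ p.1 ≤ limit ∧ st.1 < run then run else st.1
      (best, some p, run)) ((0 : Int), (none : Option (Int × Int)), (0 : Int))).1

def calculateMinimumSession_alt (numOfBankers : Int) (numOfParticipants : Int) (bankersPreferences : List (List Int)) (participantsPreferences : List (List Int)) : Int :=
  let ks1 : List (Int × Int) × List (Int × Int) :=
    (PySem.List.enumerate bankersPreferences).foldl (fun ks p =>
      p.2.foldl (fun ks2 s => (ks2.1 ++ [(p.1 + 1, s)], ks2.2 ++ [(s, p.1 + 1)])) ks) ([], [])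
  let ks : List (Int × Int) × List (Int × Int) :=
    (PySem.List.enumerate participantsPreferences).foldl (fun ks p =>
      p.2.foldl (fun ks2 b => (ks2.1 ++ [(b, p.1 + 1)], ks2.2 ++ [(p.1 + 1, b)])) ks) ks1
  max (pvMaxRun ks.1 numOfBankers) (pvMaxRun ks.2 numOfParticipants)

-- ===== PRECONDITION & SPEC =====
-- A raises ValueError (max of an empty list) when numOfBankers ≤ 0 or numOfParticipants ≤ 0.
def Pre_calculateMinimumSession (numOfBankers : Int) (numOfParticipants : Int) (bankersPreferences : List (List Int)) (participantsPreferences : List (List Int)) : Prop := 1 ≤ numOfBankers ∧ 1 ≤ numOfParticipants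
instance (numOfBankers : Int) (numOfParticipants : Int) (bankersPreferences : List (List Int)) (participantsPreferences : List (List Int)) : Decidable (Pre_calculateMinimumSession numOfBankers numOfParticipants bankersPreferences participantsPreferences) := by unfold Pre_calculateMinimumSession; infer_instance
def pvWitness_calculateMinimumSession : Int × Int × List (List Int) × List (List Int) := (2, 2, [[1, 2]], [[1]])
def Spec_calculateMinimumSession (numOfBankers : Int) (numOfParticipants : Int) (bankersPreferences : List (List Int)) (participantsPreferences : List (List Int)) (out : Int) : Prop := out = calculateMinimumSession_alt numOfBankers numOfParticipants bankersPreferences participantsPreferences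
instance (numOfBankers : Int) (numOfParticipants : Int) (bankersPreferences : List (List Int)) (participantsPreferences : List (List Int)) (out : Int) : Decidable (Spec_calculateMinimumSession numOfBankers numOfParticipants bankersPreferences participantsPreferences out) := by unfold Spec_calculateMinimumSession; infer_instance

-- ===== CLAIM (what is proved, stated in full; the proofs are below) =====
def Claim_equal_calculateMinimumSession : Prop := ∀ (numOfBankers : Int) (numOfParticipants : Int) (bankersPreferences : List (List Int)) (participantsPreferences : List (List Int)), Dom_calculateMinimumSession numOfBankers numOfParticipants bankersPreferences participantsPreferences → Pre_calculateMinimumSession numOfBankers numOfParticipants bankersPreferences participantsPreferences → Spec_calculateMinimumSession numOfBankers numOfParticipants bankersPreferences participantsPreferences (calculateMinimumSession numOfBankers numOfParticipants bankersPreferences participantsPreferences)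

-- ===== LEMMAS AND PROOFS =====

-- the scan step of pvMaxRun, named for the proofs
def pvStep (limit : Int) (st : Int × Option (Int × Int) × Int) (p : Int × Int) : Int × Option (Int × Int) × Int :=
  if some p == st.2.1 then st
  else
    let run : Int := if (match st.2.1 with | some q => q.1 == p.1 | none => false) = true then st.2.2 + 1 else 1
    let best : Int := if 1 ≤ p.1 ∧ p.1 ≤ limit ∧ st.1 < run then run else st.1
    (best, some p, run)

-- remove the elements the scan skips: every element equal to the running previous kept one
def pvDedup (q : Option (Int × Int)) : List (Int × Int) → List (Int × Int)
  | [] => []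
  | p :: t => if some p = q then pvDedup q t else p :: pvDedup (some p) t

-- number of (distinct) pairs with first component k
def pvCnt (D : List (Int × Int)) (k : Int) : Int := (D.countP (fun x => x.1 == k) : Int)

def pvBase (q : Option (Int × Int)) (r : Int) (k : Int) : Int :=
  match q with
  | some q' => if k = q'.1 then r else 0
  | none => 0

def pvLMax (l : List Int) : Int := l.foldr max 0

def pvInR (limit : Int) (p : Int × Int) : Bool := decide (1 ≤ p.1 ∧ p.1 ≤ limit)

-- the raw (banker, student) edge list both programs traverse, in traversal order
def pvEdges (bp pp : List (List Int)) : List (Int × Int) :=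
  (PySem.List.enumerate bp).flatMap (fun p => p.2.map (fun s => (p.1 + 1, s)))
  ++ (PySem.List.enumerate pp).flatMap (fun p => p.2.map (fun b => (b, p.1 + 1)))

lemma pvLMax_nonneg (l : List Int) : 0 ≤ pvLMax l := by
  induction l with
  | nil => simp [pvLMax]
  | cons x t ih => simp only [pvLMax, List.foldr_cons] at *; omega

lemma le_pvLMax (l : List Int) (x : Int) (h : x ∈ l) : x ≤ pvLMax l := by
  induction l with
  | nil => simp at h
  | cons y t ih =>
    rcases List.mem_cons.1 h with rfl | h
    · simp only [pvLMax, List.foldr_cons]; omega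
    · have := ih h; simp only [pvLMax, List.foldr_cons] at *; omega

lemma pvLMax_mem_or (l : List Int) : pvLMax l = 0 ∨ pvLMax l ∈ l := by
  induction l with
  | nil => left; rfl
  | cons y t ih =>
    simp only [pvLMax, List.foldr_cons] at *
    rcases le_or_gt (t.foldr max 0) y with h | h
    · rw [max_eq_left h]; right; exact List.mem_cons_self ..
    · rcases ih with h0 | hm
      · left; rw [max_eq_right (by omega)]; exact h0
      · right; right; rwa [max_eq_right (by omega)]

lemma pv_lex_fst_le {a b : Int × Int} (h : (toLex a : Lex (Int × Int)) < toLex b) : a.1 ≤ b.1 := by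
  rcases Prod.Lex.lt_iff.1 h with h1 | ⟨h1, _⟩ <;> simp at h1 <;> omega

lemma pv_sorted2_eq (xs : List (Int × Int)) :
    PySem.List.sorted2 xs (fun p => p.1) (fun p => p.2)
      = PySem.List.sorted xs (fun p => (toLex p : Lex (Int × Int))) := by
  unfold PySem.List.sorted2 PySem.List.sorted
  simp only [Bool.false_eq_true, reduceIte]
  congr 1
  funext acc x
  congr 1
  funext a b
  rcases a with ⟨a1, a2⟩; rcases b with ⟨b1, b2⟩
  by_cases h1 : a1 < b1 <;> by_cases h2 : b1 < a1 <;> by_cases h3 : a2 < b2 <;>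
    simp [Prod.Lex.lt_iff, h1, h2, h3] <;> omega

lemma pv_fold_dedup (limit : Int) : ∀ (l : List (Int × Int)) (b : Int) (q : Option (Int × Int)) (r : Int),
    l.foldl (pvStep limit) (b, q, r) = (pvDedup q l).foldl (pvStep limit) (b, q, r) := by
  intro l
  induction l with
  | nil => intro b q r; rfl
  | cons p t ih =>
    intro b q r
    by_cases h : some p = q
    · rw [pvDedup, if_pos h, List.foldl_cons]
      have hs : pvStep limit (b, q, r) p = (b, q, r) := by
        unfold pvStep; rw [if_pos (by simp [h])]
      rw [hs, ih]
    · rw [pvDedup, if_neg h, List.foldl_cons, List.foldl_cons]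
      have hbeq : (some p == q) = false := by simp [h]
      rcases hres : pvStep limit (b, q, r) p with ⟨b2, q2, r2⟩
      have hq2 : q2 = some p := by
        simp only [pvStep, hbeq, Bool.false_eq_true, if_false] at hres
        have := congrArg (fun s => s.2.1) hres
        simpa using this.symm
      rw [hq2]
      exact ih b2 (some p) r2

lemma pv_dedup_sorted : ∀ (l : List (Int × Int)) (q : Option (Int × Int)),
    l.Pairwise (fun a b => (toLex a : Lex (Int × Int)) ≤ toLex b) →
    (∀ q', q = some q' → ∀ x ∈ l, (toLex q' : Lex (Int × Int)) ≤ toLex x) →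
    (pvDedup q l).Pairwise (fun a b => (toLex a : Lex (Int × Int)) < toLex b)
    ∧ (∀ x, x ∈ pvDedup q l ↔ x ∈ l ∧ some x ≠ q)
    ∧ (∀ q', q = some q' → ∀ x ∈ pvDedup q l, (toLex q' : Lex (Int × Int)) < toLex x) := by
  intro l
  induction l with
  | nil => intro q _ _; refine ⟨List.Pairwise.nil, by simp [pvDedup], by simp [pvDedup]⟩
  | cons p t ih =>
    intro q hpw hq
    have hpt : ∀ x ∈ t, (toLex p : Lex (Int × Int)) ≤ toLex x := (List.pairwise_cons.1 hpw).1
    have htpw := (List.pairwise_cons.1 hpw).2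
    by_cases h : some p = q
    · rw [pvDedup, if_pos h]
      have hq' : ∀ q', q = some q' → ∀ x ∈ t, (toLex q' : Lex (Int × Int)) ≤ toLex x := by
        intro q' he x hx
        obtain rfl : p = q' := Option.some_injective _ (h ▸ he ▸ h.symm ▸ rfl)
        exact hpt x hx
      obtain ⟨h1, h2, h3⟩ := ih q htpw hq'
      refine ⟨h1, ?_, h3⟩
      intro x
      rw [h2 x]
      constructor
      · rintro ⟨hx, hne⟩; exact ⟨List.mem_cons_of_mem _ hx, hne⟩
      · rintro ⟨hx, hne⟩
        rcases List.mem_cons.1 hx with rfl | hx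
        · exact absurd h hne
        · exact ⟨hx, hne⟩
    · rw [pvDedup, if_neg h]
      obtain ⟨h1, h2, h3⟩ := ih (some p) htpw (by
        intro q' he x hx
        obtain rfl : p = q' := Option.some_injective _ he
        exact hpt x hx)
      have hall : ∀ x ∈ pvDedup (some p) t, (toLex p : Lex (Int × Int)) < toLex x :=
        h3 p rfl
      refine ⟨List.pairwise_cons.2 ⟨hall, h1⟩, ?_, ?_⟩
      · intro x
        constructor
        · intro hx
          rcases List.mem_cons.1 hx with rfl | hx
          · exact ⟨List.mem_cons_self .., fun he => h he⟩
          · obtain ⟨hxt, hxp⟩ := (h2 x).1 hx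
            refine ⟨List.mem_cons_of_mem _ hxt, ?_⟩
            -- x ∈ t, x ≠ p; if x = q' then q' ≤ p and p ≤ x = q' give p = q', contradiction with h
            intro he
            rcases q with _ | q'
            · exact absurd he (by simp)
            · have hxq : x = q' := Option.some_injective _ he
              have h1' : (toLex q' : Lex (Int × Int)) ≤ toLex p := hq q' rfl p (List.mem_cons_self ..)
              have h2' : (toLex p : Lex (Int × Int)) ≤ toLex x := hpt x hxt
              have : toLex p = toLex x := le_antisymm h2' (hxq ▸ h1')
              exact hxp (congrArg some (toLex.injective this).symm)
        · rintro ⟨hx, hne⟩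
          rcases List.mem_cons.1 hx with rfl | hx
          · exact List.mem_cons_self ..
          · by_cases hxp : some x = some p
            · rw [Option.some_injective _ hxp]; exact List.mem_cons_self ..
            · exact List.mem_cons_of_mem _ ((h2 x).2 ⟨hx, hxp⟩)
      · rintro q' rfl x hx
        have hq'p : (toLex q' : Lex (Int × Int)) ≤ toLex p := hq q' rfl p (List.mem_cons_self ..)
        have hq'ne : (toLex q' : Lex (Int × Int)) ≠ toLex p := by
          intro he
          exact h (congrArg some (toLex.injective he).symm)
        have hlt : (toLex q' : Lex (Int × Int)) < toLex p := lt_of_le_of_ne hq'p hq'ne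
        rcases List.mem_cons.1 hx with rfl | hx
        · exact hlt
        · exact lt_trans hlt (hall x hx)

lemma pv_mr (q : Option (Int × Int)) (r k : Int) :
    (if (match q with | some q' => q'.1 == k | none => false) = true then r + 1 else 1)
      = pvBase q r k + 1 := by
  rcases q with _ | q0
  · show (1 : Int) = 0 + 1
    norm_num
  · by_cases hk : q0.1 = k
    · rw [if_pos (by simp [hk])]
      show r + 1 = (if k = q0.1 then r else 0) + 1
      rw [if_pos hk.symm]
    · rw [if_neg (by simp [hk])]
      show 1 = (if k = q0.1 then r else 0) + 1
      rw [if_neg (fun h => hk h.symm)]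
      norm_num

lemma pv_fold_main (limit : Int) : ∀ (D : List (Int × Int)),
    D.Pairwise (fun a b => (toLex a : Lex (Int × Int)) < toLex b) →
    ∀ (b : Int) (q : Option (Int × Int)) (r : Int),
    (∀ q', q = some q' → ∀ x ∈ D, (toLex q' : Lex (Int × Int)) < toLex x) →
    0 ≤ b → 0 ≤ r →
    (D.foldl (pvStep limit) (b, q, r)).1
      = max b (pvLMax ((D.filter (pvInR limit)).map (fun p => pvBase q r p.1 + pvCnt D p.1))) := by
  intro D
  induction D with
  | nil =>
    intro _ b q r _ hb _
    simp only [List.foldl_nil, List.filter_nil, List.map_nil]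
    have : pvLMax [] = 0 := rfl
    omega
  | cons p t ih =>
    intro hpw b q r hq hb hr
    have hpt : ∀ x ∈ t, (toLex p : Lex (Int × Int)) < toLex x := (List.pairwise_cons.1 hpw).1
    have htpw := (List.pairwise_cons.1 hpw).2
    have hbeq : (some p == q) = false := by
      rcases q with _ | q0
      · rfl
      · have hne : p ≠ q0 := fun he => absurd (hq q0 rfl p (List.mem_cons_self ..)) (he ▸ lt_irrefl _)
        simp [hne]
    have hstep : pvStep limit (b, q, r) p
        = (if 1 ≤ p.1 ∧ p.1 ≤ limit ∧ b < pvBase q r p.1 + 1 then pvBase q r p.1 + 1 else b,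
           some p, pvBase q r p.1 + 1) := by
      simp only [pvStep, hbeq, Bool.false_eq_true, if_false, pv_mr]
    set run' : Int := pvBase q r p.1 + 1 with hrun'
    set best' : Int := if 1 ≤ p.1 ∧ p.1 ≤ limit ∧ b < run' then run' else b with hbest'
    have hrun'pos : 0 < run' := by
      rcases q with _ | q0
      · simp [hrun', pvBase]
      · simp only [hrun', pvBase]; split_ifs <;> omega
    have hbest'nn : 0 ≤ best' := by rw [hbest']; split_ifs <;> omega
    have hbm : best' = if 1 ≤ p.1 ∧ p.1 ≤ limit then max b run' else b := by
      rw [hbest']; split_ifs <;> omega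
    rw [List.foldl_cons, hstep]
    rw [ih htpw best' (some p) run'
      (by intro q' he x hx; obtain rfl : p = q' := Option.some_injective _ he; exact hpt x hx)
      hbest'nn (by omega)]
    have hcongr : ∀ x ∈ t.filter (pvInR limit),
        pvBase (some p) run' x.1 + pvCnt t x.1 = pvBase q r x.1 + pvCnt (p :: t) x.1 := by
      intro x hx
      have hxt : x ∈ t := List.mem_of_mem_filter hx
      by_cases hk : x.1 = p.1
      · have hc2 : pvCnt (p :: t) p.1 = 1 + pvCnt t p.1 := by
          simp [pvCnt, List.countP_cons]
          push_cast
          ring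
        have hbp : pvBase (some p) run' p.1 = run' := by simp [pvBase]
        rw [hk, hc2, hbp, hrun']
        ring
      · have h0 : pvBase (some p) run' x.1 = 0 := by simp [pvBase, hk]
        have hbq : pvBase q r x.1 = 0 := by
          rcases q with _ | q0
          · rfl
          · have hne : x.1 ≠ q0.1 := by
              intro hxq
              have h1 : q0.1 ≤ p.1 := pv_lex_fst_le (hq q0 rfl p (List.mem_cons_self ..))
              have h2 : p.1 ≤ x.1 := pv_lex_fst_le (hpt x hxt)
              exact hk (by omega)
            show (if x.1 = q0.1 then r else 0) = 0
            rw [if_neg hne]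
        have hpb : (p.1 == x.1) = false := by simp [Ne.symm hk]
        have hc2 : pvCnt (p :: t) x.1 = pvCnt t x.1 := by
          simp [pvCnt, hpb]
        rw [h0, hbq, hc2]
    rw [List.map_congr_left hcongr]
    by_cases hpr : 1 ≤ p.1 ∧ p.1 ≤ limit
    · have hfil : (p :: t).filter (pvInR limit) = p :: t.filter (pvInR limit) := by
        rw [List.filter_cons, if_pos (by simp [pvInR, hpr])]
      rw [hfil, List.map_cons]
      have hgp : pvBase q r p.1 + pvCnt (p :: t) p.1 = run' + pvCnt t p.1 := by
        have hc2 : pvCnt (p :: t) p.1 = 1 + pvCnt t p.1 := by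
          simp [pvCnt]
          push_cast
          ring
        rw [hc2, hrun']
        ring
      rw [hgp]
      have hLMcons : ∀ (a : Int) (l : List Int), pvLMax (a :: l) = max a (pvLMax l) := fun a l => rfl
      rw [hLMcons]
      set L := pvLMax ((t.filter (pvInR limit)).map (fun x => pvBase q r x.1 + pvCnt (p :: t) x.1)) with hL
      have hLnn : 0 ≤ L := pvLMax_nonneg _
      have hcpos : 0 ≤ pvCnt t p.1 := by simp [pvCnt]
      have hbm' : best' = max b run' := by rw [hbm, if_pos hpr]
      by_cases hc : pvCnt t p.1 = 0
      · rw [hbm', hc]; omega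
      · have hex : ∃ x ∈ t, x.1 = p.1 := by
          have hpos : 0 < t.countP (fun x => x.1 == p.1) := by
            simp only [pvCnt] at hc; omega
          obtain ⟨x, hx, hxx⟩ := List.countP_pos_iff.1 hpos
          exact ⟨x, hx, by simpa using hxx⟩
        obtain ⟨x, hxt, hxk⟩ := hex
        have hxin : x ∈ t.filter (pvInR limit) := by
          rw [List.mem_filter]
          refine ⟨hxt, by simp only [pvInR, hxk]; exact decide_eq_true hpr⟩
        have hval : pvBase q r x.1 + pvCnt (p :: t) x.1 = run' + pvCnt t p.1 := by
          rw [hxk]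
          exact hgp
        have hmem : run' + pvCnt t p.1 ≤ L := by
          rw [hL]
          refine le_pvLMax _ _ ?_
          rw [← hval]
          exact List.mem_map_of_mem hxin
        rw [hbm']
        omega
    · have hfil : (p :: t).filter (pvInR limit) = t.filter (pvInR limit) := by
        rw [List.filter_cons, if_neg (by simp [pvInR]; omega)]
      rw [hfil, hbm, if_neg hpr]

lemma pv_maxRun_eq (l : List (Int × Int)) (limit : Int) (hlim : 1 ≤ limit) :
    pvMaxRun l limit
      = (PySem.List.max? ((PySem.List.pyRange 0 limit).map (fun i =>
          (PySem.List.count ((PySem.Set.ofList l).map (fun c => c.1)) (i + 1) : Int))) (fun x => x)).getD 0 := by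
  have h0 : pvMaxRun l limit
      = ((PySem.List.sorted2 l (fun p => p.1) (fun p => p.2)).foldl (pvStep limit)
          ((0 : Int), (none : Option (Int × Int)), (0 : Int))).1 := rfl
  rw [h0, pv_sorted2_eq, pv_fold_dedup]
  set S := PySem.List.sorted l (fun p => (toLex p : Lex (Int × Int))) with hS
  have hPW : S.Pairwise (fun a b => (toLex a : Lex (Int × Int)) ≤ toLex b) :=
    PySem.List.sorted_pairwise l _
  obtain ⟨hD1, hD2, _⟩ := pv_dedup_sorted S none hPW (by intro q' he; simp at he)
  set D := pvDedup none S with hDdef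
  have hmain := pv_fold_main limit D hD1 0 none 0 (by intro q' he; simp at he)
      (le_refl 0) (le_refl 0)
  rw [hmain]
  have hmap : (D.filter (pvInR limit)).map (fun p => pvBase none 0 p.1 + pvCnt D p.1)
      = (D.filter (pvInR limit)).map (fun p => pvCnt D p.1) := by
    apply List.map_congr_left
    intro x _
    show (0 : Int) + pvCnt D x.1 = pvCnt D x.1
    omega
  rw [hmap, max_eq_right (pvLMax_nonneg _)]
  -- membership of D equals membership of l
  have hmemD : ∀ x, x ∈ D ↔ x ∈ l := by
    intro x
    rw [hD2 x]
    constructor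
    · rintro ⟨hx, _⟩; exact (List.Perm.mem_iff (PySem.List.sorted_perm l _ false)).1 hx
    · intro hx; exact ⟨(List.Perm.mem_iff (PySem.List.sorted_perm l _ false)).2 hx, by simp⟩
  have hndD : D.Nodup := by
    rw [List.nodup_iff_sublist]
    intro a ha
    have := List.Pairwise.sublist ha hD1
    rcases List.pairwise_cons.1 this with ⟨h1, _⟩
    exact lt_irrefl _ (h1 a (List.mem_cons_self ..))
  -- counts over the distinct set equal pvCnt over D
  have hcnt : ∀ k : Int, (PySem.List.count ((PySem.Set.ofList l).map (fun c => c.1)) k : Int) = pvCnt D k := by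
    intro k
    have hperm : (PySem.Set.ofList l).Perm D := by
      rw [List.perm_ext_iff_of_nodup (PySem.Set.nodup_ofList l) hndD]
      intro a
      rw [PySem.Set.mem_ofList, hmemD a]
    show ((List.count k ((PySem.Set.ofList l).map (fun c => c.1)) : Nat) : Int) = pvCnt D k
    rw [List.count, List.countP_map]
    have : (fun x => x == k) ∘ (fun (c : Int × Int) => c.1) = fun x => x.1 == k := rfl
    rw [this, pvCnt, hperm.countP_eq]
  -- both sides are the max over keys 1..limit of pvCnt D
  set M := (D.filter (pvInR limit)).map (fun p => pvCnt D p.1) with hM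
  set AL := (PySem.List.pyRange 0 limit).map (fun i =>
      (PySem.List.count ((PySem.Set.ofList l).map (fun c => c.1)) (i + 1) : Int)) with hAL
  have h0mem : (0 : Int) ∈ PySem.List.pyRange 0 limit := PySem.List.mem_pyRange_one.2 ⟨le_refl 0, by omega⟩
  have hALne : AL ≠ [] := by
    rw [hAL]
    intro he
    rw [List.map_eq_nil_iff] at he
    rw [he] at h0mem
    exact List.not_mem_nil h0mem
  obtain ⟨m, hm⟩ : ∃ m, PySem.List.max? AL (fun x => x) = some m := by
    rcases he : PySem.List.max? AL (fun x => x) with _ | m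
    · exact absurd ((PySem.List.max?_eq_none_iff AL (fun x => x)).1 he) hALne
    · exact ⟨m, rfl⟩
  rw [hm]
  show pvLMax M = m
  have hentry : ∀ i : Int, i ∈ PySem.List.pyRange 0 limit →
      (PySem.List.count ((PySem.Set.ofList l).map (fun c => c.1)) (i + 1) : Int) = pvCnt D (i + 1) :=
    fun i _ => hcnt (i + 1)
  apply le_antisymm
  · rcases pvLMax_mem_or M with h | h
    · rw [h]
      have : (PySem.List.count ((PySem.Set.ofList l).map (fun c => c.1)) (0 + 1) : Int) ∈ AL :=
        List.mem_map_of_mem h0mem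
      have hle := PySem.List.max?_isMax hm _ this
      have hnn : (0 : Int) ≤ (PySem.List.count ((PySem.Set.ofList l).map (fun c => c.1)) (0 + 1) : Int) := by positivity
      exact le_trans hnn hle
    · rw [hM] at h
      obtain ⟨p, hp, hval⟩ := List.mem_map.1 h
      have hpD : p ∈ D := List.mem_of_mem_filter hp
      have hpr : 1 ≤ p.1 ∧ p.1 ≤ limit := by
        have := (List.mem_filter.1 hp).2
        simpa [pvInR] using this
      have hi : p.1 - 1 ∈ PySem.List.pyRange 0 limit := PySem.List.mem_pyRange_one.2 ⟨by omega, by omega⟩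
      have : (PySem.List.count ((PySem.Set.ofList l).map (fun c => c.1)) (p.1 - 1 + 1) : Int) ∈ AL :=
        List.mem_map_of_mem hi
      have hle := PySem.List.max?_isMax hm _ this
      rw [hcnt] at hle
      have : pvCnt D (p.1 - 1 + 1) = pvCnt D p.1 := by norm_num
      rw [this] at hle
      rw [← hval]
      exact hle
  · have hmAL := PySem.List.max?_mem hm
    rw [hAL] at hmAL
    obtain ⟨i, hi, hval⟩ := List.mem_map.1 hmAL
    rw [hcnt] at hval
    by_cases hex : ∃ p ∈ D, p.1 = i + 1
    · obtain ⟨p, hpD, hpk⟩ := hex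
      have hir := PySem.List.mem_pyRange_one.1 hi
      have hpf : p ∈ D.filter (pvInR limit) := by
        rw [List.mem_filter]
        exact ⟨hpD, by simp only [pvInR]; exact decide_eq_true (by omega)⟩
      have : pvCnt D p.1 ∈ M := List.mem_map_of_mem hpf
      rw [← hval, ← hpk]
      exact le_pvLMax _ _ this
    · have : pvCnt D (i + 1) = 0 := by
        rw [pvCnt]
        have : D.countP (fun x => x.1 == i + 1) = 0 := by
          rw [List.countP_eq_zero]
          intro p hp
          simp only [beq_iff_eq]
          exact fun hk => hex ⟨p, hp, hk⟩
        rw [this]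
        rfl
      rw [← hval, this]
      exact pvLMax_nonneg _

lemma pv_ofList_map (f : Int × Int → Int × Int) (hf : Function.Injective f) :
    ∀ (l : List (Int × Int)), PySem.Set.ofList (l.map f) = (PySem.Set.ofList l).map f := by
  intro l
  induction l with
  | nil => rfl
  | cons x t ih =>
    rw [List.map_cons, PySem.Set.ofList_cons, PySem.Set.ofList_cons, ih, List.map_cons]
    congr 1
    show List.filter (fun y => !(y == f x)) ((PySem.Set.ofList t).map f)
        = (List.filter (fun y => !(y == x)) (PySem.Set.ofList t)).map f
    rw [List.filter_map]
    congr 1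
    apply List.filter_congr
    intro a _
    simp only [Function.comp_apply]
    by_cases h : a = x
    · simp [h]
    · have : f a ≠ f x := fun he => h (hf he)
      simp [h, this]

lemma pv_build_eq (bp pp : List (List Int)) :
    ((PySem.List.enumerate pp).foldl (fun ks p =>
      p.2.foldl (fun ks2 b => (ks2.1 ++ [(b, p.1 + 1)], ks2.2 ++ [(p.1 + 1, b)])) ks)
      ((PySem.List.enumerate bp).foldl (fun ks p =>
        p.2.foldl (fun ks2 s => (ks2.1 ++ [(p.1 + 1, s)], ks2.2 ++ [(s, p.1 + 1)])) ks) ([], [])))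
    = (pvEdges bp pp, (pvEdges bp pp).map (fun e => (e.2, e.1))) := by
  have hin : ∀ (f g : Int → Int × Int) (l : List Int) (ks : List (Int × Int) × List (Int × Int)),
      l.foldl (fun ks2 v => (ks2.1 ++ [f v], ks2.2 ++ [g v])) ks
      = (ks.1 ++ l.map f, ks.2 ++ l.map g) := by
    intro f g l ks
    rw [← Prod.mk.eta (p := ks),
      PySem.List.foldl_prod_mk (f := fun a v => a ++ [f v]) (g := fun a v => a ++ [g v])]
    rw [PySem.List.foldl_append_singleton_eq_map, PySem.List.foldl_append_singleton_eq_map]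
  have houter : ∀ (F G : Int × List Int → Int → Int × Int) (en : List (Int × List Int))
      (ks : List (Int × Int) × List (Int × Int)),
      en.foldl (fun ks p => p.2.foldl (fun ks2 v => (ks2.1 ++ [F p v], ks2.2 ++ [G p v])) ks) ks
      = (ks.1 ++ en.flatMap (fun p => p.2.map (F p)), ks.2 ++ en.flatMap (fun p => p.2.map (G p))) := by
    intro F G en ks
    rw [PySem.List.foldl_congr_mem en _
      (fun ks p => (ks.1 ++ p.2.map (F p), ks.2 ++ p.2.map (G p))) ks
      (fun ks p _ => hin (F p) (G p) p.2 ks)]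
    rw [← Prod.mk.eta (p := ks),
      PySem.List.foldl_prod_mk (f := fun a (p : Int × List Int) => a ++ p.2.map (F p))
        (g := fun a (p : Int × List Int) => a ++ p.2.map (G p))]
    rw [PySem.List.foldl_append_eq_flatMap, PySem.List.foldl_append_eq_flatMap]
  rw [houter (fun p s => (p.1 + 1, s)) (fun p s => (s, p.1 + 1)) (PySem.List.enumerate bp) ([], [])]
  rw [houter (fun p b => (b, p.1 + 1)) (fun p b => (p.1 + 1, b)) (PySem.List.enumerate pp) _]
  simp only [List.nil_append]
  refine Prod.ext rfl ?_
  show List.flatMap (fun p => List.map (fun b => (b, p.1 + 1)) p.2) (PySem.List.enumerate bp) ++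
      List.flatMap (fun p => List.map (fun s => (p.1 + 1, s)) p.2) (PySem.List.enumerate pp)
    = ((pvEdges bp pp).map (fun e => (e.2, e.1)))
  rw [pvEdges, List.map_append, List.map_flatMap, List.map_flatMap]
  congr 1 <;> apply List.flatMap_congr <;> intro p _ <;> rw [List.map_map] <;> rfl

lemma pv_enum_get {α : Type} (xs : List α) (d : α) :
    ∀ (s : Int), ∀ p ∈ PySem.List.enumerate xs s, s ≤ p.1 ∧ PySem.List.pyGetD xs (p.1 - s) d = p.2 := by
  induction xs with
  | nil => intro s p hp; simp [PySem.List.enumerate_nil] at hp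
  | cons x t ih =>
    intro s p hp
    rw [PySem.List.enumerate_cons, List.mem_cons] at hp
    rcases hp with hp | hp
    · subst hp
      refine ⟨le_refl _, ?_⟩
      simp [PySem.List.pyGetD_zero_cons]
    · obtain ⟨h1, h2⟩ := ih (s + 1) p hp
      refine ⟨by omega, ?_⟩
      rw [PySem.List.pyGetD_of_nonneg _ _ (by omega)]
      rw [PySem.List.pyGetD_of_nonneg _ _ (by omega)] at h2
      have : (p.1 - s).toNat = (p.1 - (s + 1)).toNat + 1 := by omega
      rw [this]
      simpa using h2

lemma pv_nest (xs : List (List Int)) (f : Int → Int → Int × Int) (acc : List (Int × Int)) :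
    (PySem.List.pyRange 0 (PySem.List.len xs)).foldl (fun acc i =>
      (PySem.List.pyRange 0 (PySem.List.len (PySem.List.pyGetD xs i []))).foldl (fun acc2 j =>
        acc2 ++ [f i (PySem.List.pyGetD (PySem.List.pyGetD xs i []) j 0)]) acc) acc
    = acc ++ (PySem.List.enumerate xs).flatMap (fun p => p.2.map (fun v => f p.1 v)) := by
  have h1 : ∀ (a : List (Int × Int)) (i : Int),
      (PySem.List.pyRange 0 (PySem.List.len (PySem.List.pyGetD xs i []))).foldl (fun acc2 j =>
        acc2 ++ [f i (PySem.List.pyGetD (PySem.List.pyGetD xs i []) j 0)]) a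
      = a ++ (PySem.List.pyGetD xs i []).map (fun v => f i v) := by
    intro a i
    rw [PySem.List.foldl_pyRange_zero_pyGetD (PySem.List.pyGetD xs i []) 0 (fun acc2 v => acc2 ++ [f i v]) a]
    exact PySem.List.foldl_append_singleton_eq_map _ _ _
  rw [PySem.List.foldl_congr_mem _ _ (fun a i => a ++ (PySem.List.pyGetD xs i []).map (fun v => f i v)) acc
      (fun a i _ => h1 a i)]
  rw [PySem.List.foldl_append_eq_flatMap]
  congr 1
  have h2 : PySem.List.pyRange 0 (PySem.List.len xs) = (PySem.List.enumerate xs).map (fun p => p.1) := by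
    rw [PySem.List.map_fst_enumerate]
    simp [PySem.List.len]
  rw [h2, List.flatMap_map]
  apply List.flatMap_congr
  intro p hp
  obtain ⟨h0, hget⟩ := pv_enum_get xs [] 0 p hp
  simp only [sub_zero] at hget
  rw [hget]

-- A's two loop nests build exactly pvEdges
lemma pv_comb_eq (bp pp : List (List Int)) :
    (PySem.List.pyRange 0 (PySem.List.len pp)).foldl (fun acc i =>
      (PySem.List.pyRange 0 (PySem.List.len (PySem.List.pyGetD pp i []))).foldl (fun acc2 j =>
        acc2 ++ [(PySem.List.pyGetD (PySem.List.pyGetD pp i []) j 0, i + 1)]) acc)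
      ((PySem.List.pyRange 0 (PySem.List.len bp)).foldl (fun acc i =>
        (PySem.List.pyRange 0 (PySem.List.len (PySem.List.pyGetD bp i []))).foldl (fun acc2 j =>
          acc2 ++ [(i + 1, PySem.List.pyGetD (PySem.List.pyGetD bp i []) j 0)]) acc) [])
    = pvEdges bp pp := by
  have h1 : (PySem.List.pyRange 0 (PySem.List.len bp)).foldl (fun acc i =>
        (PySem.List.pyRange 0 (PySem.List.len (PySem.List.pyGetD bp i []))).foldl (fun acc2 j =>
          acc2 ++ [(i + 1, PySem.List.pyGetD (PySem.List.pyGetD bp i []) j 0)]) acc) []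
      = [] ++ (PySem.List.enumerate bp).flatMap (fun p => p.2.map (fun s => (p.1 + 1, s))) :=
    pv_nest bp (fun i v => (i + 1, v)) []
  have h2 := pv_nest pp (fun i v => (v, i + 1))
      (([] : List (Int × Int)) ++ (PySem.List.enumerate bp).flatMap (fun p => p.2.map (fun s => (p.1 + 1, s))))
  rw [h1, h2]
  simp [pvEdges]

-- ===== VERDICT (by name: the statement is the Claim_ definition above) =====
theorem calculateMinimumSession_spec : Claim_equal_calculateMinimumSession := by
  intro nb np bp pp _ hpre
  unfold Spec_calculateMinimumSession calculateMinimumSession calculateMinimumSession_alt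
  dsimp only
  rw [pv_comb_eq, pv_build_eq]
  rw [pv_maxRun_eq _ _ hpre.1, pv_maxRun_eq _ _ hpre.2]
  rw [pv_ofList_map (fun e => (e.2, e.1)) (fun a b h => by
    simpa [Prod.ext_iff, and_comm] using h)]
  simp only [List.map_map]
  exact max_comm _ _
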